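-- pv_equiv track=rewrite | github.com/vxf/AdventOfCode | 2017/ch11/ch11_2.py | solve
-- ===== SOURCE A (Python) =====
-- d = {
--   'n' : (1, 0, 0),
--   's' : (-1, 0, 0),
--   'ne': (0, -1, 0),
--   'sw': (0, 1, 0),
--   'se': (0, 0, 1),
--   'nw': (0, 0, -1)
-- }
--
-- def add(v, u) :
--   x1, y1, z1 =  v
--   x2, y2, z2 =  u
--
--   return x1+x2, y1+y2, z1+z2
--
-- def merge(v) :
--   done = False
--
--   while not done :
--     for i in range(3):
--       j = (i+1) % 3
--       a, b = v[i], v[j]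
--       if a*b > 0 :
--         if a > 0:
--           c = min(a, b)
--           v = add(v, (-c, -c, -c))
--         else :
--           c = max(a, b)
--           v = add(v, (-c, -c, -c))
--         break
--       done = True
--
--   return v
--
-- def solve(data):
--   x, y, z = 0, 0, 0
--   m = 0
--
--   for p in data :
--     x, y, z = add(d[p], (x, y, z))
--     x, y, z = merge((x, y, z,))
--     m = max(m, abs(x) + abs(y) + abs(z))
--
--   return m
-- ===== SOURCE B (Python) =====
-- cube = {
--   'n' : (0, 1, -1),
--   's' : (0, -1, 1),
--   'ne': (1, 0, -1),
--   'sw': (-1, 0, 1),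
--   'se': (1, -1, 0),
--   'nw': (-1, 1, 0)
-- }
--
-- def solve(data):
--   x, y, z = 0, 0, 0
--   m = 0
--   for p in data:
--     dx, dy, dz = cube[p]
--     x += dx
--     y += dy
--     z += dz
--     m = max(m, (abs(x) + abs(y) + abs(z)) // 2)
--   return m
-- ===== Notes on version B (the rewrite author's own statement) =====
-- stated objective: simpler
-- what changed: Replaces A's normal-form reduction (a while/for merge loop that repeatedly cancels same-sign coordinate pairs after every step) by standard hex cube coordinates with the closed-form distance (|x|+|y|+|z|)//2, so the inner merge loop disappears.
import Mathlib
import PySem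

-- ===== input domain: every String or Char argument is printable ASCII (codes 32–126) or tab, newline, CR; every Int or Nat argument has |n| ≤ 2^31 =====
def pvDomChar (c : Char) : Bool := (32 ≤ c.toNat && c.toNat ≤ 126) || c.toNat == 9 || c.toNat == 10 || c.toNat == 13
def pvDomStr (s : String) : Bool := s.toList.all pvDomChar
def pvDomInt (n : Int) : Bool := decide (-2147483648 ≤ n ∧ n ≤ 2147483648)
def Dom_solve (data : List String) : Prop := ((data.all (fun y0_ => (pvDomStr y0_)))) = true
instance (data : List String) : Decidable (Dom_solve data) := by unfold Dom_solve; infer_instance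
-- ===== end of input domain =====

-- B replaces A's per-step normal-form merge loop by hex cube coordinates with the
-- closed-form distance (|x|+|y|+|z|)//2; objective: simpler (the per-step merge loop disappears).

-- ===== PORT A =====
-- the module-level dict d
def dA : PySem.Dict String (Int × Int × Int) :=
  PySem.Dict.ofList
    [("n", (1, 0, 0)), ("s", (-1, 0, 0)), ("ne", (0, -1, 0)),
     ("sw", (0, 1, 0)), ("se", (0, 0, 1)), ("nw", (0, 0, -1))]

-- add(v, u)
def addA (v u : Int × Int × Int) : Int × Int × Int := (v.1 + u.1, v.2.1 + u.2.1, v.2.2 + u.2.2)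

-- one execution of the `for i in range(3)` body of merge, entered with done = False:
-- the first pair (i, (i+1) % 3) with positive product is cancelled and the for breaks;
-- the returned Bool is the value of `done` at that point (done is set True by every
-- earlier non-merging i, so only a merge at i = 0 leaves done = False).
def mergePass (v : Int × Int × Int) : (Int × Int × Int) × Bool :=
  if v.1 * v.2.1 > 0 then
    (addA v (let c := if v.1 > 0 then min v.1 v.2.1 else max v.1 v.2.1; (-c, -c, -c)), false)
  else if v.2.1 * v.2.2 > 0 then
    (addA v (let c := if v.2.1 > 0 then min v.2.1 v.2.2 else max v.2.1 v.2.2; (-c, -c, -c)), true)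
  else if v.2.2 * v.1 > 0 then
    (addA v (let c := if v.2.2 > 0 then min v.2.2 v.1 else max v.2.2 v.1; (-c, -c, -c)), true)
  else (v, true)

-- termination helper for mergeA: a pass that leaves done = False merged pair (0,1),
-- whose product was positive before and is not positive afterwards
theorem mergePass_false {v w : Int × Int × Int}
    (h : mergePass v = (w, false)) : v.1 * v.2.1 > 0 ∧ ¬ w.1 * w.2.1 > 0 := by
  by_cases c1 : v.1 * v.2.1 > 0
  · simp only [mergePass, addA, if_pos c1] at h
    by_cases cb : v.1 > 0
    · rw [if_pos cb] at h
      injection h with hw _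
      subst hw
      refine ⟨c1, ?_⟩
      have hm : v.1 + -min v.1 v.2.1 = 0 ∨ v.2.1 + -min v.1 v.2.1 = 0 := by omega
      rcases hm with hm | hm <;> dsimp only <;> rw [hm] <;> simp
    · rw [if_neg cb] at h
      injection h with hw _
      subst hw
      refine ⟨c1, ?_⟩
      have hm : v.1 + -max v.1 v.2.1 = 0 ∨ v.2.1 + -max v.1 v.2.1 = 0 := by omega
      rcases hm with hm | hm <;> dsimp only <;> rw [hm] <;> simp
  · exfalso
    simp only [mergePass, addA, if_neg c1] at h
    split_ifs at h <;> simp at h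

-- merge's `while not done` loop (the pass's v and done, re-read by projection)
def mergeA (v : Int × Int × Int) : Int × Int × Int :=
  if _h : (mergePass v).2 then (mergePass v).1 else mergeA (mergePass v).1
termination_by (if v.1 * v.2.1 > 0 then (1 : Nat) else 0)
decreasing_by
  have hps : mergePass v = ((mergePass v).1, false) := by
    have h2 : (mergePass v).2 = false := by
      revert _h; cases (mergePass v).2 <;> simp
    rw [← h2]
  obtain ⟨hgt, hng⟩ := mergePass_false hps
  rw [if_pos hgt, if_neg hng]
  omega

-- solve: the main loop; d[p] raises KeyError for a key outside d, excluded by Pre_solve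
-- (the .getD default is never reached under Pre_solve)
def stepA (st : (Int × Int × Int) × Int) (p : String) : (Int × Int × Int) × Int :=
  let v := mergeA (addA ((dA.get? p).getD (0, 0, 0)) st.1)
  (v, max st.2 (|v.1| + |v.2.1| + |v.2.2|))

def solve (data : List String) : Int :=
  (data.foldl stepA ((0, 0, 0), 0)).2

-- ===== PORT B =====
-- the module-level dict cube
def cubeB : PySem.Dict String (Int × Int × Int) :=
  PySem.Dict.ofList
    [("n", (0, 1, -1)), ("s", (0, -1, 1)), ("ne", (1, 0, -1)),
     ("sw", (-1, 0, 1)), ("se", (1, -1, 0)), ("nw", (-1, 1, 0))]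

-- loop body: add the cube delta, take the closed-form distance (cube[p] raises
-- KeyError for a key outside cube, excluded by Pre_solve)
def stepB (st : (Int × Int × Int) × Int) (p : String) : (Int × Int × Int) × Int :=
  let dl := (cubeB.get? p).getD (0, 0, 0)
  let x := st.1.1 + dl.1
  let y := st.1.2.1 + dl.2.1
  let z := st.1.2.2 + dl.2.2
  ((x, y, z), max st.2 (PySem.Int.floordiv (|x| + |y| + |z|) 2))

def solve_alt (data : List String) : Int :=
  (data.foldl stepB ((0, 0, 0), 0)).2

-- ===== PRECONDITION & SPEC =====
-- Pre_solve excludes exactly the inputs containing a string that is not one of the six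
-- direction keys, on which both Pythons raise KeyError.
def Pre_solve (data : List String) : Prop :=
  ∀ s ∈ data, s = "n" ∨ s = "s" ∨ s = "ne" ∨ s = "sw" ∨ s = "se" ∨ s = "nw"
instance (data : List String) : Decidable (Pre_solve data) := by unfold Pre_solve; infer_instance

def pvWitness_solve : List String := ["ne", "ne", "s", "nw"]

def Spec_solve (data : List String) (out : Int) : Prop := out = solve_alt data
instance (data : List String) (out : Int) : Decidable (Spec_solve data out) := by unfold Spec_solve; infer_instance

-- ===== CLAIM (what is proved, stated in full; the proofs are below) =====
def Claim_equal_solve : Prop := ∀ (data : List String), Dom_solve data → Pre_solve data → Spec_solve data (solve data)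

-- ===== LEMMAS AND PROOFS =====

-- the linear map sending A's coordinates to B's cube coordinates; it kills (1,1,1),
-- the direction merge cancels along
def toCube (v : Int × Int × Int) : Int × Int × Int :=
  (v.2.2 - v.2.1, v.1 - v.2.2, v.2.1 - v.1)

theorem mergePass_toCube (v : Int × Int × Int) : toCube (mergePass v).1 = toCube v := by
  simp only [mergePass, addA, toCube]
  split_ifs <;> simp only [Prod.mk.injEq] <;> omega

theorem mergeA_toCube (v : Int × Int × Int) : toCube (mergeA v) = toCube v := by
  induction v using mergeA.induct with
  | case1 v h =>
      unfold mergeA; rw [dif_pos h]; exact mergePass_toCube v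
  | case2 v h ih =>
      unfold mergeA; rw [dif_neg h, ih]; exact mergePass_toCube v

-- a pass ending with done = True leaves a fully merged vector:
-- no two cyclically adjacent components have the same strict sign
theorem mergePass_true {v w : Int × Int × Int} (h : mergePass v = (w, true)) :
    w.1 * w.2.1 ≤ 0 ∧ w.2.1 * w.2.2 ≤ 0 ∧ w.2.2 * w.1 ≤ 0 := by
  by_cases c1 : v.1 * v.2.1 > 0
  · exfalso
    simp only [mergePass, addA, if_pos c1] at h
    split_ifs at h <;> simp at h
  by_cases c2 : v.2.1 * v.2.2 > 0
  · simp only [mergePass, addA, if_neg c1, if_pos c2] at h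
    by_cases cb : v.2.1 > 0
    · rw [if_pos cb] at h
      injection h with hw _
      subst hw
      have hc : 0 < v.2.2 := by
        rcases mul_pos_iff.mp c2 with ⟨_, hx⟩ | ⟨hx, _⟩ <;> omega
      have ha : v.1 ≤ 0 := by
        by_contra hx; exact c1 (mul_pos (by omega) cb)
      refine ⟨?_, ?_, ?_⟩ <;> dsimp only
      · exact mul_nonpos_iff.mpr (Or.inr ⟨by omega, by omega⟩)
      · have hm : v.2.1 + -min v.2.1 v.2.2 = 0 ∨ v.2.2 + -min v.2.1 v.2.2 = 0 := by omega
        rcases hm with hm | hm <;> rw [hm] <;> simp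
      · exact mul_nonpos_iff.mpr (Or.inl ⟨by omega, by omega⟩)
    · rw [if_neg cb] at h
      injection h with hw _
      subst hw
      have hb : v.2.1 < 0 := by
        rcases mul_pos_iff.mp c2 with ⟨hx, _⟩ | ⟨hx, _⟩ <;> omega
      have hc : v.2.2 < 0 := by
        rcases mul_pos_iff.mp c2 with ⟨hx, _⟩ | ⟨_, hx⟩ <;> omega
      have ha : 0 ≤ v.1 := by
        by_contra hx; exact c1 (mul_pos_of_neg_of_neg (by omega) hb)
      refine ⟨?_, ?_, ?_⟩ <;> dsimp only
      · exact mul_nonpos_iff.mpr (Or.inl ⟨by omega, by omega⟩)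
      · have hm : v.2.1 + -max v.2.1 v.2.2 = 0 ∨ v.2.2 + -max v.2.1 v.2.2 = 0 := by omega
        rcases hm with hm | hm <;> rw [hm] <;> simp
      · exact mul_nonpos_iff.mpr (Or.inr ⟨by omega, by omega⟩)
  by_cases c3 : v.2.2 * v.1 > 0
  · simp only [mergePass, addA, if_neg c1, if_neg c2, if_pos c3] at h
    by_cases cc : v.2.2 > 0
    · rw [if_pos cc] at h
      injection h with hw _
      subst hw
      have ha : 0 < v.1 := by
        rcases mul_pos_iff.mp c3 with ⟨_, hx⟩ | ⟨hx, _⟩ <;> omega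
      have hb : v.2.1 ≤ 0 := by
        by_contra hx; exact c1 (mul_pos ha (by omega))
      refine ⟨?_, ?_, ?_⟩ <;> dsimp only
      · exact mul_nonpos_iff.mpr (Or.inl ⟨by omega, by omega⟩)
      · exact mul_nonpos_iff.mpr (Or.inr ⟨by omega, by omega⟩)
      · have hm : v.2.2 + -min v.2.2 v.1 = 0 ∨ v.1 + -min v.2.2 v.1 = 0 := by omega
        rcases hm with hm | hm <;> rw [hm] <;> simp
    · rw [if_neg cc] at h
      injection h with hw _
      subst hw
      have hc : v.2.2 < 0 := by
        rcases mul_pos_iff.mp c3 with ⟨hx, _⟩ | ⟨hx, _⟩ <;> omega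
      have ha : v.1 < 0 := by
        rcases mul_pos_iff.mp c3 with ⟨hx, _⟩ | ⟨_, hx⟩ <;> omega
      have hb : 0 ≤ v.2.1 := by
        by_contra hx; exact c1 (mul_pos_of_neg_of_neg ha (by omega))
      refine ⟨?_, ?_, ?_⟩ <;> dsimp only
      · exact mul_nonpos_iff.mpr (Or.inr ⟨by omega, by omega⟩)
      · exact mul_nonpos_iff.mpr (Or.inl ⟨by omega, by omega⟩)
      · have hm : v.2.2 + -max v.2.2 v.1 = 0 ∨ v.1 + -max v.2.2 v.1 = 0 := by omega
        rcases hm with hm | hm <;> rw [hm] <;> simp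
  · simp only [mergePass, addA, if_neg c1, if_neg c2, if_neg c3] at h
    injection h with hw _
    subst hw
    exact ⟨not_lt.mp c1, not_lt.mp c2, not_lt.mp c3⟩

-- after merge, no two cyclically adjacent components have the same strict sign
theorem mergeA_merged (v : Int × Int × Int) :
    (mergeA v).1 * (mergeA v).2.1 ≤ 0 ∧ (mergeA v).2.1 * (mergeA v).2.2 ≤ 0 ∧
      (mergeA v).2.2 * (mergeA v).1 ≤ 0 := by
  induction v using mergeA.induct with
  | case2 v h ih => unfold mergeA; rw [dif_neg h]; exact ih
  | case1 v h =>
      unfold mergeA; rw [dif_pos h]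
      have hps : mergePass v = ((mergePass v).1, true) := by rw [← h]
      exact mergePass_true hps

-- for a merged vector the cube distance equals A's coordinate sum exactly
theorem abs_sum_merged {a b c : Int} (h1 : a * b ≤ 0) (h2 : b * c ≤ 0) (h3 : c * a ≤ 0) :
    |c - b| + |a - c| + |b - a| = 2 * (|a| + |b| + |c|) := by
  rcases mul_nonpos_iff.mp h1 with ⟨p1, q1⟩ | ⟨p1, q1⟩ <;>
  rcases mul_nonpos_iff.mp h2 with ⟨p2, q2⟩ | ⟨p2, q2⟩ <;>
  rcases mul_nonpos_iff.mp h3 with ⟨p3, q3⟩ | ⟨p3, q3⟩ <;>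
  simp only [Int.abs_eq_natAbs] <;> omega

theorem floordiv_dist (v : Int × Int × Int) :
    PySem.Int.floordiv
        (|(toCube (mergeA v)).1| + |(toCube (mergeA v)).2.1| + |(toCube (mergeA v)).2.2|) 2 =
      |(mergeA v).1| + |(mergeA v).2.1| + |(mergeA v).2.2| := by
  obtain ⟨h1, h2, h3⟩ := mergeA_merged v
  simp only [toCube]
  rw [abs_sum_merged h1 h2 h3, PySem.Int.floordiv_eq_ediv_of_pos (by omega)]
  omega

-- one step preserves the relation "B's position is toCube of A's position, counters
-- equal", given matching deltas with the cube delta equal to toCube of A's delta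
theorem step_case (p : String) (dlA : Int × Int × Int)
    (hA : (dA.get? p).getD (0, 0, 0) = dlA) (hB : (cubeB.get? p).getD (0, 0, 0) = toCube dlA)
    (sa sb : (Int × Int × Int) × Int)
    (h1 : sb.1 = toCube sa.1) (h2 : sb.2 = sa.2) :
    (stepB sb p).1 = toCube (stepA sa p).1 ∧ (stepB sb p).2 = (stepA sa p).2 := by
  obtain ⟨⟨a, b, c⟩, m⟩ := sa
  obtain ⟨⟨X, Y, Z⟩, M⟩ := sb
  obtain ⟨d1, d2, d3⟩ := dlA
  simp only at h1 h2
  subst h2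
  have hT := mergeA_toCube (addA (d1, d2, d3) (a, b, c))
  have hF := floordiv_dist (addA (d1, d2, d3) (a, b, c))
  rw [hT] at hF
  simp only [stepA, stepB, hA, hB]
  have hx : X + (toCube (d1, d2, d3)).1 = (toCube (addA (d1, d2, d3) (a, b, c))).1 := by
    simp only [toCube, addA] at h1 ⊢
    have := congrArg (fun t => t.1) h1
    simp only at this; omega
  have hy : Y + (toCube (d1, d2, d3)).2.1 = (toCube (addA (d1, d2, d3) (a, b, c))).2.1 := by
    simp only [toCube, addA] at h1 ⊢
    have := congrArg (fun t => t.2.1) h1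
    simp only at this; omega
  have hz : Z + (toCube (d1, d2, d3)).2.2 = (toCube (addA (d1, d2, d3) (a, b, c))).2.2 := by
    simp only [toCube, addA] at h1 ⊢
    have := congrArg (fun t => t.2.2) h1
    simp only at this; omega
  constructor
  · rw [hx, hy, hz, ← hT]
  · rw [hx, hy, hz, hF]

-- one step, for any of the six admitted direction strings
theorem step_rel (sa sb : (Int × Int × Int) × Int) (p : String)
    (hp : p = "n" ∨ p = "s" ∨ p = "ne" ∨ p = "sw" ∨ p = "se" ∨ p = "nw")
    (h1 : sb.1 = toCube sa.1) (h2 : sb.2 = sa.2) :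
    (stepB sb p).1 = toCube (stepA sa p).1 ∧ (stepB sb p).2 = (stepA sa p).2 := by
  rcases hp with h | h | h | h | h | h <;> subst h
  · exact step_case _ (1, 0, 0) rfl rfl sa sb h1 h2
  · exact step_case _ (-1, 0, 0) rfl rfl sa sb h1 h2
  · exact step_case _ (0, -1, 0) rfl rfl sa sb h1 h2
  · exact step_case _ (0, 1, 0) rfl rfl sa sb h1 h2
  · exact step_case _ (0, 0, 1) rfl rfl sa sb h1 h2
  · exact step_case _ (0, 0, -1) rfl rfl sa sb h1 h2

theorem fold_rel (data : List String) (sa sb : (Int × Int × Int) × Int)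
    (hp : ∀ s ∈ data, s = "n" ∨ s = "s" ∨ s = "ne" ∨ s = "sw" ∨ s = "se" ∨ s = "nw")
    (h1 : sb.1 = toCube sa.1) (h2 : sb.2 = sa.2) :
    (data.foldl stepB sb).1 = toCube (data.foldl stepA sa).1 ∧
      (data.foldl stepB sb).2 = (data.foldl stepA sa).2 := by
  induction data generalizing sa sb with
  | nil => exact ⟨h1, h2⟩
  | cons p rest ih =>
      obtain ⟨g1, g2⟩ := step_rel sa sb p (hp p (List.mem_cons_self ..)) h1 h2
      exact ih (stepA sa p) (stepB sb p) (fun s hs => hp s (List.mem_cons_of_mem _ hs)) g1 g2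

-- ===== VERDICT (by name: the statement is the Claim_ definition above) =====
theorem solve_spec : Claim_equal_solve := by
  intro data _ hpre
  unfold Spec_solve solve solve_alt
  exact ((fold_rel data ((0,0,0),0) ((0,0,0),0) hpre rfl rfl).2).symm
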